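-- pv_equiv track=rewrite | github.com/softwarecorridor/plexfileprep | fileparser.py | get_non_bracket_text
-- ===== SOURCE A (Python) =====
-- def get_non_bracket_text(string):
--     result = []
--     non_brackets = [s.split(']')[-1] for s in string.split('[')]
--
--     if non_brackets:
--         for item in non_brackets:
--             if item:
--                 result.append(item.strip())
--     else:
--         result.append(string)
--     return result
-- ===== SOURCE B (Python) =====
-- def get_non_bracket_text(string):
--     result = []
--     buf = ""
--     for ch in string:
--         if ch == '[':
--             if buf:
--                 result.append(buf.strip())
--             buf = ""
--         elif ch == ']':
--             buf = ""
--         else: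
--             buf += ch
--     if buf:
--         result.append(buf.strip())
--     return result
-- ===== Notes on version B (the rewrite author's own statement) =====
-- stated objective: alternative
-- what changed: Replaced the split-based pipeline (split on opening brackets, take the text after the last closing bracket of each piece, filter and strip) by a single-pass character scanner that keeps one buffer, resets it at closing brackets and flushes it stripped at opening brackets and at the end, building no intermediate lists.
import Mathlib
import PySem

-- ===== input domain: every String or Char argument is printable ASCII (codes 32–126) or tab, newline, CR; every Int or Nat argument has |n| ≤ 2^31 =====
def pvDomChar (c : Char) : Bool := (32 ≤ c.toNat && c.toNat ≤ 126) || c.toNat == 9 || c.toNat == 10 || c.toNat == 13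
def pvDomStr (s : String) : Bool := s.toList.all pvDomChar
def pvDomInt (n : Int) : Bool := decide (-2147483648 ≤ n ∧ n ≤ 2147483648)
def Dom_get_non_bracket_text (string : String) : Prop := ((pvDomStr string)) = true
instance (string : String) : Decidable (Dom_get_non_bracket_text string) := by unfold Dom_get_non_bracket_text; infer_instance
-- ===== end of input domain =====

-- B replaces A's split-based pipeline by a single-pass buffer scanner (same results, no intermediate split lists).

-- ===== PORT A =====
-- strings are handled as their char lists; String.mk rebuilds the results at the end
def get_non_bracket_text (string : String) : List String :=
  let result : List (List Char) := []
  let non_brackets : List (List Char) :=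
    (PySem.Chars.splitOn string.toList ['[']).map
      (fun s => PySem.List.pyGetD (PySem.Chars.splitOn s [']']) (-1) [])
  let result :=
    if non_brackets ≠ [] then
      non_brackets.foldl
        (fun r item => if item ≠ [] then r ++ [PySem.Chars.strip item] else r) result
    else result ++ [string.toList]
  result.map String.mk

-- ===== PORT B =====
-- flush: append the stripped buffer to the result when the buffer is non-empty
def altFlush (buf : List Char) (res : List (List Char)) : List (List Char) :=
  if buf ≠ [] then res ++ [PySem.Chars.strip buf] else res

-- the scanner loop: '[' flushes and resets the buffer, ']' resets it, anything else extends it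
def altScan : List Char → List Char → List (List Char) → List (List Char)
  | [], buf, res => altFlush buf res
  | c :: cs, buf, res =>
    if c = '[' then altScan cs [] (altFlush buf res)
    else if c = ']' then altScan cs [] res
    else altScan cs (buf ++ [c]) res

def get_non_bracket_text_alt (string : String) : List String :=
  (altScan string.toList [] []).map String.mk

-- ===== PRECONDITION & SPEC =====
def Spec_get_non_bracket_text (string : String) (out : List String) : Prop := out = get_non_bracket_text_alt string
instance (string : String) (out : List String) : Decidable (Spec_get_non_bracket_text string out) := by unfold Spec_get_non_bracket_text; infer_instance

-- ===== CLAIM (what is proved, stated in full; the proofs are below) =====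
def Claim_equal_get_non_bracket_text : Prop := ∀ (string : String), Dom_get_non_bracket_text string → Spec_get_non_bracket_text string (get_non_bracket_text string)

-- ===== LEMMAS AND PROOFS =====

-- single-char split, returned as (first group, remaining groups) so the result is non-empty by shape
def csplit1 (sep : Char) : List Char → List Char × List (List Char)
  | [] => ([], [])
  | c :: cs =>
    if c = sep then ([], (csplit1 sep cs).1 :: (csplit1 sep cs).2)
    else (c :: (csplit1 sep cs).1, (csplit1 sep cs).2)

-- text after the last ']' of l
def gAfter (l : List Char) : List Char :=
  (((csplit1 ']' l).1 :: (csplit1 ']' l).2).getLast?).getD []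

lemma go_eq (sep : Char) (l : List Char) : ∀ (fuel : Nat) (cur : List Char) (acc : List (List Char)),
    l.length < fuel →
    PySem.Chars.splitOn.go [sep] fuel l cur acc
      = acc.reverse ++ (cur.reverse ++ (csplit1 sep l).1) :: (csplit1 sep l).2 := by
  induction l with
  | nil =>
    intro fuel cur acc h
    match fuel, h with
    | fuel+1, _ => simp [PySem.Chars.splitOn.go, csplit1]
  | cons c rest ih =>
    intro fuel cur acc h
    match fuel, h with
    | fuel+1, h =>
      by_cases hc : c = sep
      · subst hc
        rw [show PySem.Chars.splitOn.go [c] (fuel+1) (c :: rest) cur acc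
              = PySem.Chars.splitOn.go [c] fuel rest [] (cur.reverse :: acc) from by
            simp [PySem.Chars.splitOn.go, List.isPrefixOf]]
        rw [ih fuel [] (cur.reverse :: acc) (by simpa using Nat.lt_of_succ_lt_succ h)]
        simp [csplit1]
      · have hpre : ([sep].isPrefixOf (c :: rest)) = false := by
          simp only [List.isPrefixOf, Bool.and_true]
          exact beq_eq_false_iff_ne.mpr (fun h' => hc h'.symm)
        rw [show PySem.Chars.splitOn.go [sep] (fuel+1) (c :: rest) cur acc
              = PySem.Chars.splitOn.go [sep] fuel rest (c :: cur) acc from by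
            simp [PySem.Chars.splitOn.go, hpre]]
        rw [ih fuel (c :: cur) acc (by simpa using Nat.lt_of_succ_lt_succ h)]
        simp [csplit1, hc]

lemma splitOn_eq (sep : Char) (l : List Char) :
    PySem.Chars.splitOn l [sep] = (csplit1 sep l).1 :: (csplit1 sep l).2 := by
  unfold PySem.Chars.splitOn
  rw [go_eq sep l (l.length + 1) [] [] (by omega)]
  simp

lemma pyGetD_splitOn (l : List Char) :
    PySem.List.pyGetD (PySem.Chars.splitOn l [']']) (-1) [] = gAfter l := by
  rw [splitOn_eq]
  exact (PySem.List.pyGetD_neg_one _ [] (by simp)).trans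
    (by unfold gAfter; rw [List.getLast?_eq_some_getLast (l := (csplit1 ']' l).1 :: (csplit1 ']' l).2) (by simp)]; rfl)

lemma csplit1_no_sep {sep : Char} {l : List Char} (h : sep ∉ l) : csplit1 sep l = (l, []) := by
  induction l with
  | nil => rfl
  | cons c cs ih =>
    simp only [List.mem_cons, not_or] at h
    simp [csplit1, Ne.symm h.1, ih h.2]

lemma csplit1_snd_ne {sep : Char} {l : List Char} (h : sep ∈ l) : (csplit1 sep l).2 ≠ [] := by
  induction l with
  | nil => simp at h
  | cons c cs ih =>
    by_cases hc : c = sep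
    · subst hc; simp [csplit1]
    · have : sep ∈ cs := by
        rcases List.mem_cons.mp h with h' | h'
        · exact absurd h'.symm hc
        · exact h'
      simp [csplit1, hc, ih this]

lemma gAfter_no_rbr {l : List Char} (h : ']' ∉ l) : gAfter l = l := by
  simp [gAfter, csplit1_no_sep h]

lemma gAfter_rbr_cons (cs : List Char) : gAfter (']' :: cs) = gAfter cs := by
  simp [gAfter, csplit1]

lemma gAfter_cons_mem {c : Char} {cs : List Char} (hc : c ≠ ']') (h : ']' ∈ cs) :
    gAfter (c :: cs) = gAfter cs := by
  have ht := csplit1_snd_ne h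
  cases hts : (csplit1 ']' cs).2 with
  | nil => exact absurd hts ht
  | cons a t => simp [gAfter, csplit1, if_neg hc, hts]

lemma gAfter_append_rbr {x : List Char} (y : List Char) (hx : ']' ∉ x) :
    gAfter (x ++ ']' :: y) = gAfter y := by
  induction x with
  | nil => simpa using gAfter_rbr_cons y
  | cons c x' ih =>
    simp only [List.mem_cons, not_or] at hx
    rw [List.cons_append, gAfter_cons_mem (Ne.symm hx.1) (by simp), ih hx.2]

lemma scan_eq (cs : List Char) : ∀ (buf : List Char) (res : List (List Char)), ']' ∉ buf →
    altScan cs buf res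
      = (csplit1 '[' cs).2.foldl (fun r seg => altFlush (gAfter seg) r)
          (altFlush (gAfter (buf ++ (csplit1 '[' cs).1)) res) := by
  induction cs with
  | nil =>
    intro buf res hb
    simp [altScan, csplit1, gAfter_no_rbr hb]
  | cons c cs ih =>
    intro buf res hb
    by_cases h1 : c = '['
    · subst h1
      simp only [altScan, csplit1]
      rw [ih [] (altFlush buf res) (by simp)]
      simp [gAfter_no_rbr hb]
    · by_cases h2 : c = ']'
      · subst h2
        simp only [altScan, if_neg (show ¬ (']' : Char) = '[' by decide), csplit1]
        rw [ih [] res (by simp)]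
        rw [gAfter_append_rbr (csplit1 '[' cs).1 hb]
        simp
      · simp only [altScan, if_neg h1, if_neg h2, csplit1]
        rw [ih (buf ++ [c]) res (by simp [hb]; exact fun h' => h2 h'.symm)]
        simp

-- ===== VERDICT (by name: the statement is the Claim_ definition above) =====
theorem get_non_bracket_text_spec : Claim_equal_get_non_bracket_text := by
  intro string _
  show get_non_bracket_text string = get_non_bracket_text_alt string
  unfold get_non_bracket_text get_non_bracket_text_alt
  rw [splitOn_eq]
  simp only [List.map_cons, ne_eq, List.cons_ne_nil, not_false_eq_true, if_true,
    List.foldl_cons, List.foldl_map, pyGetD_splitOn]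
  rw [scan_eq string.toList [] [] (by simp)]
  simp [altFlush]
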